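-- pv_equiv track=rewrite | github.com/Javitito/ajax-kernel | agency/lab_worker.py | _providers_audit_needs_refresh
-- ===== SOURCE A (Python) =====
-- from typing import Any, Dict, Optional
--
-- def _providers_audit_needs_refresh(audit_doc: Dict[str, Any]) -> bool:
--     refresh_codes = {
--         "policy_provider_missing_in_status",
--         "council_quorum_risk",
--         "timeouts_missing_p95_base",
--     }
--     findings = audit_doc.get("findings") if isinstance(audit_doc.get("findings"), list) else []
--     for item in findings:
--         if not isinstance(item, dict):
--             continue
--         code = str(item.get("code") or "").strip().lower()
--         if code in refresh_codes:
--             return True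
--     return False
-- ===== SOURCE B (Python) =====
-- def _providers_audit_needs_refresh(audit_doc):
--     refresh_codes = (
--         "policy_provider_missing_in_status",
--         "council_quorum_risk",
--         "timeouts_missing_p95_base",
--     )
--     raw = audit_doc.get("findings")
--     if not isinstance(raw, list):
--         return False
--     for code in refresh_codes:
--         for item in raw:
--             if isinstance(item, dict) and str(item.get("code") or "").strip().lower() == code:
--                 return True
--     return False
-- ===== Notes on version B (the rewrite author's own statement) =====
-- stated objective: alternative
-- what changed: Inverts the traversal: instead of one scan over findings testing set membership, B loops over the three fixed refresh codes and for each scans the findings for an equal normalized code, with no set at all; correct since the two existential quantifiers commute.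
import Mathlib
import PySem

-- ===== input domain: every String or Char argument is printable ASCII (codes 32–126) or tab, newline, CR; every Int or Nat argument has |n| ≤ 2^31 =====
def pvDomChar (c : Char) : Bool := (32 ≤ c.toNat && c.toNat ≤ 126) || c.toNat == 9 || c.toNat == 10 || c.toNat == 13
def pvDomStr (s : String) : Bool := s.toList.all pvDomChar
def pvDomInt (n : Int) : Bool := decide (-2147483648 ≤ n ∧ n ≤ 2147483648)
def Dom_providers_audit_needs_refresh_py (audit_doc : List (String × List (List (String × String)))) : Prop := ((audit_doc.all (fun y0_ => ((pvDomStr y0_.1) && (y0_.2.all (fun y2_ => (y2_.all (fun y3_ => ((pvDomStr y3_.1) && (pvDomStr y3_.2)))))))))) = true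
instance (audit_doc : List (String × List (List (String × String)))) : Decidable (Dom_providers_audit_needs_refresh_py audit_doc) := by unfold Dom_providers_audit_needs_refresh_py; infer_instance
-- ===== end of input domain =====

-- B inverts the traversal: it loops over the three fixed refresh codes and scans the
-- findings for an equal normalized code, instead of A's single scan with set membership.

-- ===== PORT A =====
def pvRefreshCodes : List String :=
  ["policy_provider_missing_in_status", "council_quorum_risk", "timeouts_missing_p95_base"]

-- str(item.get('code') or '').strip().lower()  (value is a str; 'or' yields '' for None)
def pvNormCode (item : List (String × String)) : String :=
  PySem.Str.lower (PySem.Str.strip ((item.lookup "code").getD ""))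

-- the 'for item in findings' loop with early return (isinstance(item, dict) always holds here)
def pvLoopA : List (List (String × String)) → Bool
  | [] => false
  | item :: rest => if pvNormCode item ∈ pvRefreshCodes then true else pvLoopA rest

def providers_audit_needs_refresh_py (audit_doc : List (String × List (List (String × String)))) : Bool :=
  let findings := (audit_doc.lookup "findings").getD []
  pvLoopA findings

-- ===== PORT B =====
-- inner 'for item in raw' loop of B: does any finding normalize to this code?
def pvFindCode (c : String) : List (List (String × String)) → Bool
  | [] => false
  | item :: rest => if pvNormCode item == c then true else pvFindCode c rest

-- outer 'for code in refresh_codes' loop of B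
def pvLoopB (fs : List (List (String × String))) : List String → Bool
  | [] => false
  | c :: cs => if pvFindCode c fs then true else pvLoopB fs cs

def providers_audit_needs_refresh_py_alt (audit_doc : List (String × List (List (String × String)))) : Bool :=
  match audit_doc.lookup "findings" with
  | none => false          -- 'if not isinstance(raw, list): return False'
  | some raw => pvLoopB raw pvRefreshCodes

-- ===== PRECONDITION & SPEC =====
def Spec_providers_audit_needs_refresh_py (audit_doc : List (String × List (List (String × String)))) (out : Bool) : Prop := out = providers_audit_needs_refresh_py_alt audit_doc
instance (audit_doc : List (String × List (List (String × String)))) (out : Bool) : Decidable (Spec_providers_audit_needs_refresh_py audit_doc out) := by unfold Spec_providers_audit_needs_refresh_py; infer_instance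

-- ===== CLAIM =====
def Claim_equal_providers_audit_needs_refresh_py : Prop := ∀ (audit_doc : List (String × List (List (String × String)))), Dom_providers_audit_needs_refresh_py audit_doc → Spec_providers_audit_needs_refresh_py audit_doc (providers_audit_needs_refresh_py audit_doc)

-- ===== LEMMAS AND PROOFS =====
theorem pvLoopA_iff (fs : List (List (String × String))) :
    pvLoopA fs = true ↔ ∃ item ∈ fs, pvNormCode item ∈ pvRefreshCodes := by
  induction fs with
  | nil => simp [pvLoopA]
  | cons item rest ih =>
    by_cases h : pvNormCode item ∈ pvRefreshCodes
    · simp [pvLoopA, h]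
    · simp [pvLoopA, h, ih]

theorem pvFindCode_iff (c : String) (fs : List (List (String × String))) :
    pvFindCode c fs = true ↔ ∃ item ∈ fs, pvNormCode item = c := by
  induction fs with
  | nil => simp [pvFindCode]
  | cons item rest ih =>
    by_cases h : pvNormCode item = c
    · simp [pvFindCode, h]
    · simp [pvFindCode, h, ih]

theorem pvLoopB_iff (fs : List (List (String × String))) (cs : List String) :
    pvLoopB fs cs = true ↔ ∃ c ∈ cs, ∃ item ∈ fs, pvNormCode item = c := by
  induction cs with
  | nil => simp [pvLoopB]
  | cons c rest ih =>
    by_cases h : pvFindCode c fs = true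
    · obtain ⟨item, hi, hc⟩ := (pvFindCode_iff c fs).mp h
      simp only [pvLoopB, h, if_true, true_iff]
      exact ⟨c, List.mem_cons_self .., item, hi, hc⟩
    · rw [pvLoopB, if_neg h, ih]
      constructor
      · rintro ⟨c', hc', hx⟩; exact ⟨c', List.mem_cons_of_mem _ hc', hx⟩
      · rintro ⟨c', hc', hx⟩
        rcases List.mem_cons.mp hc' with rfl | hm
        · exact absurd ((pvFindCode_iff c' fs).mpr hx) h
        · exact ⟨c', hm, hx⟩

-- ===== VERDICT =====
theorem providers_audit_needs_refresh_py_spec : Claim_equal_providers_audit_needs_refresh_py := by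
  intro audit_doc _
  unfold Spec_providers_audit_needs_refresh_py
  unfold providers_audit_needs_refresh_py providers_audit_needs_refresh_py_alt
  cases h : audit_doc.lookup "findings" with
  | none => simp [pvLoopA]
  | some raw =>
    simp only [Option.getD_some]
    rw [Bool.eq_iff_iff, pvLoopA_iff, pvLoopB_iff]
    constructor
    · rintro ⟨item, hi, hc⟩; exact ⟨pvNormCode item, hc, item, hi, rfl⟩
    · rintro ⟨c, _, item, hi, rfl⟩; exact ⟨item, hi, ‹_›⟩
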